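-- pv_equiv track=rewrite | github.com/datahub-project/datahub | datahub-agent-context/src/datahub_agent_context/mcp_tools/base.py | _disable_newer_gms_fields
-- ===== SOURCE A (Python) =====
-- def _disable_newer_gms_fields(query: str) -> str:
--     """
--     Disable newer GMS fields by commenting out lines with #[NEWER_GMS] marker.
--
--     Converts:
--         someField  #[NEWER_GMS]
--     To:
--         # someField  #[NEWER_GMS]
--     """
--     lines = query.split("\n")
--     processed_lines = []
--     for line in lines:
--         if "#[NEWER_GMS]" in line:
--             # Comment out the line by prefixing with #
--             processed_lines.append("# " + line)
--         else:
--             processed_lines.append(line)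
--     return "\n".join(processed_lines)
-- ===== SOURCE B (Python) =====
-- def _disable_newer_gms_fields(query: str) -> str:
--     # Single streaming pass over characters with a line buffer; no split()/join("\n")
--     # over an intermediate list of lines.
--     out = []
--     buf = []
--     for ch in query:
--         if ch == "\n":
--             line = "".join(buf)
--             out.append("# " + line if "#[NEWER_GMS]" in line else line)
--             out.append("\n")
--             buf = []
--         else:
--             buf.append(ch)
--     line = "".join(buf)
--     out.append("# " + line if "#[NEWER_GMS]" in line else line)
--     return "".join(out)
-- ===== Notes on version B (the rewrite author's own statement) =====
-- stated objective: alternative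
-- what changed: B makes one streaming pass over the characters with a line buffer, emitting output pieces as it goes and joining once at the end, instead of A's split-into-lines / per-line list / join pipeline.
import Mathlib
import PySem

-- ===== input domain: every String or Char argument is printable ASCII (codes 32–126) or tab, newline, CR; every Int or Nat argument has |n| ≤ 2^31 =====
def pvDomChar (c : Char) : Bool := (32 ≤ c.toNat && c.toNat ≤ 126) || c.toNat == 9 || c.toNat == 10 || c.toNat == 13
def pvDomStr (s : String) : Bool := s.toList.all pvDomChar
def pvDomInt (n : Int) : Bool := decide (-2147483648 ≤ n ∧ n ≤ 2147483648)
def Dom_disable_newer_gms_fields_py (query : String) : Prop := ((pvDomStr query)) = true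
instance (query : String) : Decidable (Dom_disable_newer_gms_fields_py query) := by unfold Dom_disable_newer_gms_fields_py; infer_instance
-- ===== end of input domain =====

-- B replaces A's split("\n") / per-line list / "\n".join pipeline by one streaming pass
-- over the characters with a line buffer (objective: alternative, same cost).
-- Both ports work on code points (String.toList) via PySem.Chars; exact on the stated ASCII domain.

-- ===== PORT A =====
-- lines = query.split("\n"); loop appending "# " + line when "#[NEWER_GMS]" in line; "\n".join
def disable_newer_gms_fields_py (query : String) : String :=
  let lines := PySem.Chars.splitOn query.toList ['\n']
  let processed := lines.foldl
    (fun acc line =>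
      if PySem.Chars.isIn "#[NEWER_GMS]".toList line then
        acc ++ [('#' :: ' ' :: line)]
      else
        acc ++ [line]) []
  String.ofList (PySem.Chars.join ['\n'] processed)

-- ===== PORT B =====
-- the body of B's for-loop over the characters: flush the buffer at '\n', else extend it
def pvStepB (p : List (List Char) × List Char) (ch : Char) : List (List Char) × List Char :=
  if ch = '\n' then
    (p.1 ++ [if PySem.Chars.isIn "#[NEWER_GMS]".toList p.2 then '#' :: ' ' :: p.2 else p.2]
         ++ [['\n']], [])
  else
    (p.1, p.2 ++ [ch])

def disable_newer_gms_fields_py_alt (query : String) : String :=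
  let r := query.toList.foldl pvStepB ([], [])
  String.ofList (PySem.Chars.join []
    (r.1 ++ [if PySem.Chars.isIn "#[NEWER_GMS]".toList r.2 then '#' :: ' ' :: r.2 else r.2]))

-- ===== PRECONDITION & SPEC =====
def Spec_disable_newer_gms_fields_py (query : String) (out : String) : Prop := out = disable_newer_gms_fields_py_alt query
instance (query : String) (out : String) : Decidable (Spec_disable_newer_gms_fields_py query out) := by unfold Spec_disable_newer_gms_fields_py; infer_instance

-- ===== CLAIM (what is proved, stated in full; the proofs are below) =====
def Claim_equal_disable_newer_gms_fields_py : Prop := ∀ (query : String), Dom_disable_newer_gms_fields_py query → Spec_disable_newer_gms_fields_py query (disable_newer_gms_fields_py query)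

-- ===== LEMMAS AND PROOFS =====

-- the per-line transform both programs apply
def pvG (line : List Char) : List Char :=
  if PySem.Chars.isIn "#[NEWER_GMS]".toList line then '#' :: ' ' :: line else line

-- split at '\n' with an explicit prefix buffer (reference shape for A's splitOn)
def pvSplitNL : List Char → List Char → List (List Char)
  | buf, [] => [buf]
  | buf, c :: rest => if c = '\n' then buf :: pvSplitNL [] rest else pvSplitNL (buf ++ [c]) rest

-- the common streamed result both sides are reduced to
def pvLoop : List Char → List Char → List Char
  | buf, [] => pvG buf
  | buf, c :: rest => if c = '\n' then pvG buf ++ '\n' :: pvLoop [] rest else pvLoop (buf ++ [c]) rest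

lemma pvSplitNL_ne_nil (l buf : List Char) : pvSplitNL buf l ≠ [] := by
  induction l generalizing buf with
  | nil => simp [pvSplitNL]
  | cons c rest ih =>
    simp only [pvSplitNL]
    split_ifs
    · simp
    · exact ih _

lemma pvGo_spec : ∀ (fuel : Nat) (l cur : List Char) (acc : List (List Char)),
    l.length ≤ fuel →
    PySem.Chars.splitOn.go ['\n'] fuel l cur acc = acc.reverse ++ pvSplitNL cur.reverse l := by
  intro fuel
  induction fuel with
  | zero =>
    intro l cur acc h
    have : l = [] := by cases l <;> simp_all
    subst this
    simp [PySem.Chars.splitOn.go, pvSplitNL]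
  | succ f ih =>
    intro l cur acc h
    cases l with
    | nil => simp [PySem.Chars.splitOn.go, pvSplitNL]
    | cons c rest =>
      by_cases hc : c = '\n'
      · subst hc
        simp only [PySem.Chars.splitOn.go, List.isPrefixOf, BEq.rfl, Bool.and_self, if_true,
          List.length_singleton, List.drop_succ_cons, List.drop_zero]
        rw [ih rest [] (cur.reverse :: acc) (by simpa using Nat.le_of_succ_le_succ h)]
        simp [pvSplitNL]
      · have hpre : ['\n'].isPrefixOf (c :: rest) = false := by
          simp [List.isPrefixOf]
          exact fun hh => absurd hh.symm hc
        simp only [PySem.Chars.splitOn.go, hpre, Bool.false_eq_true, if_false]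
        rw [ih rest (c :: cur) acc (by simpa using Nat.le_of_succ_le_succ h)]
        simp [pvSplitNL, hc]

lemma pvSplitOn_eq (cs : List Char) :
    PySem.Chars.splitOn cs ['\n'] = pvSplitNL [] cs := by
  unfold PySem.Chars.splitOn
  rw [pvGo_spec (cs.length + 1) cs [] [] (Nat.le_succ _)]
  simp

lemma pvJoin_nil_flatten (xs : List (List Char)) : PySem.Chars.join [] xs = xs.flatten := by
  induction xs with
  | nil => simp [PySem.Chars.join, List.intercalate]
  | cons a t ih =>
    cases t with
    | nil => simp [PySem.Chars.join, List.intercalate, List.intersperse]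
    | cons b t' =>
      rw [PySem.Chars.join_cons_cons, List.flatten_cons, ← ih]
      simp

lemma pvJoinMap : ∀ (l buf : List Char),
    PySem.Chars.join ['\n'] ((pvSplitNL buf l).map pvG) = pvLoop buf l := by
  intro l
  induction l with
  | nil => intro buf; simp [pvSplitNL, pvLoop, PySem.Chars.join_singleton]
  | cons c rest ih =>
    intro buf
    by_cases hc : c = '\n'
    · subst hc
      simp only [pvSplitNL, if_true, pvLoop, List.map_cons]
      obtain ⟨y, ys, hys⟩ : ∃ y ys, pvSplitNL ([] : List Char) rest = y :: ys := by
        cases h : pvSplitNL ([] : List Char) rest with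
        | nil => exact absurd h (pvSplitNL_ne_nil rest [])
        | cons y ys => exact ⟨y, ys, rfl⟩
      rw [hys, List.map_cons, PySem.Chars.join_cons_cons, ← List.map_cons, ← hys, ih]
      simp
    · simp only [pvSplitNL, hc, if_false, pvLoop]
      exact ih (buf ++ [c])

lemma pvFoldA (lines : List (List Char)) : ∀ (init : List (List Char)),
    lines.foldl
      (fun acc line =>
        if PySem.Chars.isIn "#[NEWER_GMS]".toList line then acc ++ [('#' :: ' ' :: line)]
        else acc ++ [line]) init = init ++ lines.map pvG := by
  induction lines with
  | nil => intro init; simp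
  | cons a t ih =>
    intro init
    simp only [List.foldl_cons, List.map_cons]
    by_cases h : PySem.Chars.isIn "#[NEWER_GMS]".toList a = true
    · have hga : pvG a = '#' :: ' ' :: a := by unfold pvG; rw [if_pos h]
      rw [if_pos h, ih, hga]; simp
    · have hga : pvG a = a := by unfold pvG; rw [if_neg h]
      rw [if_neg h, ih, hga]; simp

lemma pvFoldB : ∀ (l : List Char) (out : List (List Char)) (buf : List Char),
    ((l.foldl pvStepB (out, buf)).1 ++ [pvG (l.foldl pvStepB (out, buf)).2]).flatten
      = out.flatten ++ pvLoop buf l := by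
  intro l
  induction l with
  | nil => intro out buf; simp [pvLoop]
  | cons c rest ih =>
    intro out buf
    simp only [List.foldl_cons]
    by_cases hc : c = '\n'
    · subst hc
      have hs : pvStepB (out, buf) '\n' = (out ++ [pvG buf] ++ [['\n']], []) := by
        simp [pvStepB, pvG]
      rw [hs, ih]
      simp [pvLoop]
    · have : pvStepB (out, buf) c = (out, buf ++ [c]) := by simp [pvStepB, hc]
      rw [this, ih]
      simp [pvLoop, hc]

-- ===== VERDICT (by name: the statement is the Claim_ definition above) =====
theorem disable_newer_gms_fields_py_spec : Claim_equal_disable_newer_gms_fields_py := by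
  intro query _
  unfold Spec_disable_newer_gms_fields_py
  simp only [disable_newer_gms_fields_py, disable_newer_gms_fields_py_alt]
  have hg : ∀ l : List Char,
      (if PySem.Chars.isIn "#[NEWER_GMS]".toList l then '#' :: ' ' :: l else l) = pvG l :=
    fun _ => rfl
  rw [pvSplitOn_eq, pvFoldA, List.nil_append, pvJoinMap, pvJoin_nil_flatten, hg, pvFoldB]
  simp
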